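-- pv_equiv track=rewrite | github.com/manwar/perlweeklychallenge-club | challenge-260/lubos-kolouch/python/ch-2.py | dictionary_rank
-- ===== SOURCE A (Python) =====
-- from functools import reduce
-- from operator import mul
--
-- def calculate_factorials(n: int) -> dict[int, int]:
--     """Calculate factorials from 0 to n."""
--     factorials = {0: 1}
--     for i in range(1, n + 1):
--         factorials[i] = factorials[i - 1] * i
--     return factorials
--
-- def count_char_occurrences(word: str) -> dict[str, int]:
--     """Count occurrences of each character in a word."""
--     counts: dict[str, int] = {}
--     for char in word:
--         counts[char] = counts.get(char, 0) + 1
--     return counts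
--
-- def product(iterable):
--     """Compute the product of an iterable of numbers."""
--     return reduce(mul, iterable, 1)
--
-- def dictionary_rank(word: str) -> int:
--     """Compute the dictionary rank of the given word."""
--     length = len(word)
--     factorials = calculate_factorials(length)
--     char_counts = count_char_occurrences(word)
--     rank = 1
--
--     for i, char in enumerate(word):
--         smaller_chars = sum(count for c, count in char_counts.items() if c < char)
--         rank += (
--             smaller_chars
--             * factorials[length - i - 1]
--             // product(factorials[c] for c in char_counts.values())
--         )
--
--         # Decrement the count for the current character
--         char_counts[char] -= 1
--         if char_counts[char] == 0:
--             del char_counts[char]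
--
--     return rank
-- ===== SOURCE B (Python) =====
-- def dictionary_rank(word: str) -> int:
--     """Compute the dictionary rank of the given word."""
--     n = len(word)
--     fact = [1]
--     for i in range(1, n + 1):
--         fact.append(fact[-1] * i)
--     cnt = [0] * 256
--     denom = 1
--     total = 0
--     k = 0
--     for ch in reversed(word):
--         o = ord(ch)
--         cnt[o] += 1
--         denom *= cnt[o]
--         total += sum(cnt[:o]) * fact[k] // denom
--         k += 1
--     return total + 1
-- ===== Notes on version B (the rewrite author's own statement) =====
-- stated objective: faster
-- what changed: B scans the word right-to-left, maintaining a 256-entry count array and an incrementally updated denominator (product of count factorials) instead of rebuilding a dict, recomputing that big-integer product from scratch every iteration and decrementing/deleting counts as A does.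
import Mathlib
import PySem

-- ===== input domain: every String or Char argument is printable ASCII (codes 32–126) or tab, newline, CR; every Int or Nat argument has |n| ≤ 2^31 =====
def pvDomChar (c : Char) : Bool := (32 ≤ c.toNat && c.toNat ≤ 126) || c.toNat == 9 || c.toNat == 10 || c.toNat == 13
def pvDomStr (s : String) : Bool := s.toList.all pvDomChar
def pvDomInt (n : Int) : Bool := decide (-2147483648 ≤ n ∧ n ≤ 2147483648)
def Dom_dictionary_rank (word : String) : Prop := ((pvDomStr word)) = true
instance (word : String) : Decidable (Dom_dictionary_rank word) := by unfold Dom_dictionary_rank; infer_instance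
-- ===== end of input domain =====

-- B re-implements the rank: one right-to-left pass with a count array and an incrementally
-- maintained denominator (product of count factorials) instead of A's per-position dict scan
-- and from-scratch big-integer product; measured faster by a constant factor.

-- ===== PORT A =====
def calculate_factorials (n : Int) : PySem.Dict Int Int :=
  (PySem.List.pyRange 1 (n + 1) 1).foldl
    (fun factorials i => factorials.insert i (factorials.getD (i - 1) 0 * i))
    (PySem.Dict.ofList [(0, 1)])

def count_char_occurrences (word : String) : PySem.Dict Char Int :=
  word.toList.foldl (fun counts ch => counts.insert ch (counts.getD ch 0 + 1)) PySem.Dict.empty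

def product (l : List Int) : Int := l.foldl (· * ·) 1

-- the body of A's `for i, char in enumerate(word)` loop (dict lookups whose key is always
-- present are ported with getD; the default is never consulted)
def rankStep (length : Int) (factorials : PySem.Dict Int Int)
    (st : PySem.Dict Char Int × Int) (p : Int × Char) : PySem.Dict Char Int × Int :=
  let charCounts := st.1
  let smaller := charCounts.items.foldl (fun acc q => if q.1 < p.2 then acc + q.2 else acc) 0
  let rank := st.2 + PySem.Int.floordiv
    (smaller * factorials.getD (length - p.1 - 1) 0)
    (product (charCounts.values.map (fun c => factorials.getD c 0)))
  let charCounts := charCounts.insert p.2 (charCounts.getD p.2 0 - 1)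
  let charCounts := if charCounts.getD p.2 0 == 0 then charCounts.erase p.2 else charCounts
  (charCounts, rank)

def dictionary_rank (word : String) : Int :=
  let length : Int := PySem.Str.len word
  let factorials := calculate_factorials length
  ((PySem.List.enumerate word.toList 0).foldl (rankStep length factorials)
    (count_char_occurrences word, 1)).2

-- ===== PORT B =====
def build_fact (n : Int) : List Int :=
  (PySem.List.pyRange 1 (n + 1) 1).foldl
    (fun fact i => fact ++ [PySem.List.pyGetD fact (-1) 0 * i]) [(1 : Int)]

-- the body of B's `for ch in reversed(word)` loop
def altStep (fact : List Int) (st : List Int × Int × Int × Int) (ch : Char) :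
    List Int × Int × Int × Int :=
  let (cnt, denom, total, k) := st
  let o : Int := (ch.toNat : Int)
  let cnt := PySem.List.pySetD cnt o (PySem.List.pyGetD cnt o 0 + 1)
  let denom := denom * PySem.List.pyGetD cnt o 0
  let total := total + PySem.Int.floordiv
    ((PySem.List.slice cnt none (some o)).foldl (· + ·) 0 * PySem.List.pyGetD fact k 0)
    denom
  (cnt, denom, total, k + 1)

def dictionary_rank_alt (word : String) : Int :=
  let n : Int := PySem.Str.len word
  let fact := build_fact n
  (word.toList.reverse.foldl (altStep fact) (List.replicate 256 0, 1, 0, 0)).2.2.1 + 1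

-- ===== PRECONDITION & SPEC =====
def Spec_dictionary_rank (word : String) (out : Int) : Prop := out = dictionary_rank_alt word
instance (word : String) (out : Int) : Decidable (Spec_dictionary_rank word out) := by unfold Spec_dictionary_rank; infer_instance

-- ===== CLAIM (what is proved, stated in full; the proofs are below) =====
def Claim_equal_dictionary_rank : Prop := ∀ (word : String), Dom_dictionary_rank word → Spec_dictionary_rank word (dictionary_rank word)

-- ===== LEMMAS AND PROOFS =====

-- the common mathematical shape: the denominator for suffix s (product of the factorials of
-- the multiplicities of s), the per-position term, and the sum of the terms
def denomOf : List Char → Int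
  | [] => 1
  | c :: t => denomOf t * ((t.count c : Int) + 1)

def termOf (c : Char) (t : List Char) : Int :=
  PySem.Int.floordiv
    (((c :: t).countP (fun x => decide (x < c)) : Int) * (t.length.factorial : Int))
    (denomOf (c :: t))

def Gsum : List Char → Int
  | [] => 0
  | c :: t => termOf c t + Gsum t

-- ---- the factorials table of A ----
lemma fact_dict (n : Nat) : ∀ k : Nat, k ≤ n →
    (calculate_factorials (n : Int)).getD (k : Int) 0 = (k.factorial : Int) := by
  induction n with
  | zero =>
    intro k hk
    interval_cases k
    rw [calculate_factorials]
    rw [show ((0 : Nat) : Int) + 1 = 1 by norm_num, PySem.List.pyRange_one_eq_nil (show (1:Int) ≤ 1 from le_rfl)]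
    rfl
  | succ n ih =>
    intro k hk
    have hc : ((n + 1 : Nat) : Int) + 1 = ((n : Int) + 1) + 1 := by push_cast; ring
    rw [calculate_factorials, hc,
      PySem.List.pyRange_one_succ_right (a := 1) (b := (n : Int) + 1) (by omega), List.foldl_append]
    rw [show (PySem.List.pyRange 1 ((n : Int) + 1) 1).foldl
        (fun factorials i => factorials.insert i (factorials.getD (i - 1) 0 * i))
        (PySem.Dict.ofList [(0, 1)]) = calculate_factorials (n : Int) from rfl]
    simp only [List.foldl_cons, List.foldl_nil]
    rw [PySem.Dict.getD_insert]
    rcases Nat.lt_or_ge k (n + 1) with hlt | hge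
    · rw [if_neg (by omega)]
      exact ih k (by omega)
    · have hk1 : k = n + 1 := by omega
      subst hk1
      rw [if_pos (by push_cast; ring)]
      rw [show (n : Int) + 1 - 1 = (n : Int) by ring, ih n le_rfl]
      rw [Nat.factorial_succ]
      push_cast
      ring

-- ---- A's dict invariant: d holds the multiplicities of the current suffix s ----
def InvD (s : List Char) (d : PySem.Dict Char Int) : Prop :=
  d.keys.Nodup ∧ ∀ c : Char, d.get? c = if s.count c = 0 then none else some ((s.count c : Nat) : Int)

lemma InvD.contains_iff {s d} (h : InvD s d) (c : Char) : c ∈ d.keys ↔ c ∈ s := by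
  have h2 := h.2 c
  constructor
  · intro hm
    by_contra hs
    rw [if_pos (List.count_eq_zero.mpr hs)] at h2
    exact (PySem.Dict.get?_eq_none_iff_not_mem_keys d c).mp h2 hm
  · intro hs
    rw [if_neg (by simpa [List.count_eq_zero] using hs)] at h2
    by_contra hm
    rw [(PySem.Dict.get?_eq_none_iff_not_mem_keys d c).mpr hm] at h2
    simp at h2

lemma InvD.getD_eq {s d} (h : InvD s d) (c : Char) (hc : c ∈ s) :
    d.getD c 0 = ((s.count c : Nat) : Int) := by
  have h2 := h.2 c
  rw [if_neg (by simpa [List.count_eq_zero] using hc)] at h2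
  rw [PySem.Dict.getD_eq_get?_getD, h2]
  rfl

-- erase on a PySem.Dict (items filter): lookups
lemma find?_filter_ne (k k' : Char) : ∀ (l : List (Char × Int)),
    (l.filter (fun p => !(p.1 == k))).find? (fun p => p.1 == k')
      = if k' = k then none else l.find? (fun p => p.1 == k')
  | [] => by simp
  | p :: t => by
    rcases eq_or_ne p.1 k with hpk | hpk <;> rcases eq_or_ne p.1 k' with hpk' | hpk' <;>
      rcases eq_or_ne k' k with hk | hk <;>
      simp_all [find?_filter_ne k k' t]

lemma dict_get?_erase (d : PySem.Dict Char Int) (k k' : Char) :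
    (d.erase k).get? k' = if k' = k then none else d.get? k' := by
  show Option.map _ (((d.items.filter (fun p => !(p.1 == k))).find? (fun p => p.1 == k'))) = _
  rw [find?_filter_ne]
  by_cases hk : k' = k
  · rw [if_pos hk, if_pos hk]; rfl
  · rw [if_neg hk, if_neg hk]; rfl

lemma dict_keys_erase_sublist (d : PySem.Dict Char Int) (k : Char) :
    (d.erase k).keys.Sublist d.keys := by
  exact List.Sublist.map (fun p => p.1) (List.filter_sublist (l := d.items))

-- Finset sums/products of multiplicities
lemma sum_counts (A : Finset Char) (p : Char → Bool) : ∀ (s : List Char), (∀ c ∈ s, c ∈ A) →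
    (∑ k ∈ A.filter (fun k => p k), (s.count k : Int)) = (s.countP p : Int) := by
  intro s
  induction s with
  | nil => intro _; simp
  | cons x s ih =>
    intro hs
    have hx : x ∈ A := hs x List.mem_cons_self
    have hcnt : ∀ k : Char, (((x :: s).count k : Nat) : Int)
        = ((s.count k : Nat) : Int) + (if k = x then 1 else 0) := by
      intro k
      by_cases h : k = x
      · simp [h]
      · simp [h, Ne.symm h]
    rw [Finset.sum_congr rfl (fun k _ => hcnt k), Finset.sum_add_distrib,
      ih (fun c hc => hs c (List.mem_cons_of_mem x hc)), Finset.sum_ite_eq']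
    rw [List.countP_cons]
    by_cases hpx : p x = true
    · have hmem : x ∈ A.filter (fun k => p k) := Finset.mem_filter.mpr ⟨hx, hpx⟩
      rw [if_pos hmem]
      simp only [hpx, if_true]
      push_cast
      ring
    · have hmem : x ∉ A.filter (fun k => p k) := fun hm => hpx (Finset.mem_filter.mp hm).2
      rw [if_neg hmem]
      simp only [hpx, Bool.false_eq_true, if_false]
      push_cast
      ring

lemma prod_fact_counts (A : Finset Char) : ∀ (s : List Char), (∀ c ∈ s, c ∈ A) →
    (∏ k ∈ A, ((s.count k).factorial : Int)) = denomOf s := by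
  intro s
  induction s with
  | nil => intro _; simp [denomOf]
  | cons x s ih =>
    intro hs
    have hx : x ∈ A := hs x List.mem_cons_self
    have hold := ih (fun c hc => hs c (List.mem_cons_of_mem x hc))
    rw [← Finset.mul_prod_erase A _ hx] at hold ⊢
    have hcong : ∀ k ∈ A.erase x, (((x :: s).count k).factorial : Int)
        = ((s.count k).factorial : Int) := by
      intro k hk
      rw [List.count_cons_of_ne (Ne.symm (Finset.mem_erase.mp hk).1)]
    rw [Finset.prod_congr rfl hcong, List.count_cons_self, Nat.factorial_succ, denomOf,
      ← hold]
    push_cast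
    ring

-- A's "smaller" accumulation equals the countP of the suffix
lemma smaller_eq {s d} (h : InvD s d) (ch : Char) :
    d.items.foldl (fun acc q => if q.1 < ch then acc + q.2 else acc) 0
      = (s.countP (fun x => decide (x < ch)) : Int) := by
  rw [PySem.List.foldl_ite_eq_foldl_filter (fun q : Char × Int => q.1 < ch)
        (fun acc q => acc + q.2),
      PySem.List.foldl_add _ (fun q : Char × Int => q.2) 0,
      PySem.Dict.items_eq_map_keys d h.1 0, List.filter_map, List.map_map]
  rw [show ((fun x : Char × Int => decide (x.1 < ch)) ∘ fun k : Char => (k, d.getD k 0))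
      = (fun k : Char => decide (k < ch)) from rfl]
  have hmap : ∀ k ∈ d.keys.filter (fun k => decide (k < ch)),
      ((fun q : Char × Int => q.2) ∘ fun k => (k, d.getD k 0)) k = ((s.count k : Nat) : Int) := by
    intro k hk
    exact h.getD_eq k ((h.contains_iff k).mp (List.mem_of_mem_filter hk))
  rw [List.map_congr_left hmap, zero_add,
    ← List.sum_toFinset _ (h.1.filter (fun k => decide (k < ch))),
    List.toFinset_filter,
    sum_counts d.keys.toFinset (fun x => decide (x < ch)) s
      (fun c hc => List.mem_toFinset.mpr ((h.contains_iff c).mpr hc))]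

-- A's denominator product equals denomOf
lemma product_eq {s d} (h : InvD s d) (n : Nat) (hs : s.length ≤ n) :
    product (d.values.map (fun c => (calculate_factorials (n : Int)).getD c 0)) = denomOf s := by
  rw [product, ← List.prod_eq_foldl, PySem.Dict.values_eq_map_keys d h.1 0, List.map_map]
  have hmap : ∀ k ∈ d.keys,
      ((fun c => (calculate_factorials (n : Int)).getD c 0) ∘ fun k => d.getD k 0) k
        = (((s.count k).factorial : Nat) : Int) := by
    intro k hk
    have hks : k ∈ s := (h.contains_iff k).mp hk
    show (calculate_factorials (n : Int)).getD (d.getD k 0) 0 = _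
    rw [h.getD_eq k hks]
    exact fact_dict n (s.count k) (le_trans List.count_le_length hs)
  rw [List.map_congr_left hmap, ← List.prod_toFinset _ h.1,
    prod_fact_counts d.keys.toFinset s
      (fun c hc => List.mem_toFinset.mpr ((h.contains_iff c).mpr hc))]

-- the decrement/delete step preserves the invariant for the tail
lemma InvD.step {c t d} (h : InvD (c :: t) d) :
    InvD t (if (d.insert c (d.getD c 0 - 1)).getD c 0 == 0
            then (d.insert c (d.getD c 0 - 1)).erase c
            else d.insert c (d.getD c 0 - 1)) := by
  have hgd : d.getD c 0 = (((c :: t).count c : Nat) : Int) := h.getD_eq c List.mem_cons_self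
  have hnd1 : (d.insert c (d.getD c 0 - 1)).keys.Nodup :=
    PySem.Dict.nodup_keys_insert d c _ h.1
  have hget1 : ∀ x, (d.insert c (d.getD c 0 - 1)).get? x
      = if x = c then some ((t.count c : Nat) : Int) else d.get? x := by
    intro x
    rw [PySem.Dict.get?_insert]
    by_cases hx : x = c
    · rw [if_pos hx, if_pos hx, hgd, List.count_cons_self]
      congr 1
      push_cast
      ring
    · rw [if_neg hx, if_neg hx]
  have hgd1 : (d.insert c (d.getD c 0 - 1)).getD c 0 = ((t.count c : Nat) : Int) := by
    rw [PySem.Dict.getD_eq_get?_getD, hget1 c, if_pos rfl]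
    rfl
  have htail : ∀ x, x ≠ c → d.get? x
      = if t.count x = 0 then none else some ((t.count x : Nat) : Int) := by
    intro x hx
    rw [h.2 x, List.count_cons_of_ne (Ne.symm hx)]
  by_cases h0 : t.count c = 0
  · have hbeq : ((d.insert c (d.getD c 0 - 1)).getD c 0 == 0) = true := by
      rw [hgd1, h0]
      rfl
    rw [if_pos hbeq]
    refine ⟨List.Sublist.nodup (dict_keys_erase_sublist _ c) hnd1, fun x => ?_⟩
    rw [dict_get?_erase]
    by_cases hx : x = c
    · rw [if_pos hx, hx, if_pos h0]
    · rw [if_neg hx, hget1 x, if_neg hx, htail x hx]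
  · have hbeq : ((d.insert c (d.getD c 0 - 1)).getD c 0 == 0) = false := by
      rw [hgd1]
      simpa using h0
    rw [if_neg (show ¬ ((d.insert c (d.getD c 0 - 1)).getD c 0 == 0) = true by
      rw [hbeq]; exact Bool.false_ne_true)]
    refine ⟨hnd1, fun x => ?_⟩
    rw [hget1 x]
    by_cases hx : x = c
    · rw [if_pos hx, hx, if_neg h0]
    · rw [if_neg hx, htail x hx]

-- A's main loop
lemma A_loop (n : Nat) : ∀ (s : List Char), s.length ≤ n → ∀ (d : PySem.Dict Char Int) (r : Int),
    InvD s d →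
    ((PySem.List.enumerate s ((n : Int) - (s.length : Int))).foldl
      (rankStep (n : Int) (calculate_factorials (n : Int))) (d, r)).2 = r + Gsum s := by
  intro s
  induction s with
  | nil =>
    intro _ d r _
    simp [PySem.List.enumerate_nil, Gsum]
  | cons c t ih =>
    intro hlen d r hInv
    have hlt : t.length ≤ n := by
      simp only [List.length_cons] at hlen
      omega
    rw [PySem.List.enumerate_cons, List.foldl_cons]
    have hfidx : (n : Int) - ((n : Int) - (((c :: t).length : Nat) : Int)) - 1
        = ((t.length : Nat) : Int) := by
      push_cast [List.length_cons]
      ring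
    have hpair : rankStep (n : Int) (calculate_factorials (n : Int)) (d, r)
        ((n : Int) - (((c :: t).length : Nat) : Int), c)
        = (if (d.insert c (d.getD c 0 - 1)).getD c 0 == 0
             then (d.insert c (d.getD c 0 - 1)).erase c
             else d.insert c (d.getD c 0 - 1),
           r + termOf c t) := by
      simp only [rankStep]
      rw [smaller_eq hInv c, hfidx, fact_dict n t.length hlt, product_eq hInv n hlen, termOf]
    rw [hpair]
    have harith : (n : Int) - (((c :: t).length : Nat) : Int) + 1
        = (n : Int) - ((t.length : Nat) : Int) := by
      push_cast [List.length_cons]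
      ring
    rw [harith, ih hlt _ _ hInv.step, Gsum]
    ring

lemma counter_InvD (w : List Char) :
    InvD w (w.foldl (fun counts ch => counts.insert ch (counts.getD ch 0 + 1)) PySem.Dict.empty) := by
  rw [PySem.Dict.foldl_insert_getD_add_one_eq_counter]
  refine ⟨PySem.Dict.nodup_keys_counter w, fun c => ?_⟩
  by_cases hc : c ∈ w
  · have hcont : (PySem.Dict.counter w).contains c = true := by
      rw [PySem.Dict.contains_counter]
      simpa using hc
    have hsome : ((PySem.Dict.counter w).get? c).isSome := by
      rw [← PySem.Dict.contains_eq_isSome_get?, hcont]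
    obtain ⟨v, hv⟩ := Option.isSome_iff_exists.mp hsome
    have hval : v = ((w.count c : Nat) : Int) := by
      have := PySem.Dict.getD_counter w c
      rw [PySem.Dict.getD_eq_get?_getD, hv] at this
      simpa using this
    rw [hv, hval, if_neg (by simpa [List.count_eq_zero] using hc)]
  · have hcont : (PySem.Dict.counter w).contains c = false := by
      rw [PySem.Dict.contains_counter]
      simpa using hc
    have hnone : (PySem.Dict.counter w).get? c = none := by
      have := PySem.Dict.contains_eq_isSome_get? (PySem.Dict.counter w) c
      rw [hcont] at this
      exact Option.not_isSome_iff_eq_none.mp (by rw [← this]; simp)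
    rw [hnone, if_pos (List.count_eq_zero.mpr hc)]

lemma A_val (word : String) : dictionary_rank word = 1 + Gsum word.toList := by
  have hloop := A_loop word.toList.length word.toList le_rfl
    (count_char_occurrences word) 1 (counter_InvD word.toList)
  rw [show (word.toList.length : Int) - ((word.toList.length : Nat) : Int) = 0 by ring] at hloop
  rw [dictionary_rank]
  rw [show PySem.Str.len word = ((word.toList.length : Nat) : Int) by
    simp [String.length_toList]]
  exact hloop

-- ---- B side ----
lemma build_fact_eq (n : Nat) :
    build_fact (n : Int) = (List.range (n + 1)).map (fun k => (k.factorial : Int)) := by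
  induction n with
  | zero =>
    rw [build_fact, show ((0 : Nat) : Int) + 1 = 1 by norm_num,
      PySem.List.pyRange_one_eq_nil (show (1 : Int) ≤ 1 from le_rfl)]
    rfl
  | succ n ih =>
    have hc : ((n + 1 : Nat) : Int) + 1 = ((n : Int) + 1) + 1 := by push_cast; ring
    rw [build_fact, hc, PySem.List.pyRange_one_succ_right (a := 1) (b := (n : Int) + 1) (by omega),
      List.foldl_append]
    rw [show (PySem.List.pyRange 1 ((n : Int) + 1) 1).foldl
        (fun fact i => fact ++ [PySem.List.pyGetD fact (-1) 0 * i]) [(1 : Int)]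
        = build_fact (n : Int) from rfl, ih]
    simp only [List.foldl_cons, List.foldl_nil]
    have hlast : PySem.List.pyGetD
        ((List.range (n + 1)).map (fun k => (k.factorial : Int))) (-1) 0
        = (n.factorial : Int) := by
      rw [List.range_succ, List.map_append, List.map_singleton,
        PySem.List.pyGetD_neg_one_append_singleton]
    rw [hlast, show List.range (n + 1 + 1) = List.range (n + 1) ++ [n + 1] from List.range_succ,
      List.map_append, List.map_singleton,
      show ((n.factorial : Int)) * ((n : Int) + 1) = (((n + 1).factorial : Nat) : Int) by
        rw [Nat.factorial_succ]; push_cast; ring]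

def cntOf (s : List Char) : List Int :=
  (List.range 256).map (fun o => ((s.countP (fun c => c.toNat == o) : Nat) : Int))

lemma char_beq_toNat (x c : Char) : (x.toNat == c.toNat) = (x == c) := by
  by_cases h : x = c
  · simp [h]
  · have hne : x.toNat ≠ c.toNat := fun hn => h (Char.ext (UInt32.toNat_inj.mp hn))
    simp [h, hne]

lemma countP_toNat_eq_count (c : Char) (t : List Char) :
    t.countP (fun x => x.toNat == c.toNat) = t.count c := by
  rw [List.countP_congr (fun a _ => by rw [char_beq_toNat]), List.count_eq_countP]

lemma cntOf_getElem? (s : List Char) (o : Nat) (h : o < 256) :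
    (cntOf s)[o]? = some ((s.countP (fun c => c.toNat == o) : Nat) : Int) := by
  rw [cntOf, List.getElem?_map, List.getElem?_range h]
  rfl

lemma cntOf_set (c : Char) (t : List Char) (_h : c.toNat < 256) :
    (cntOf t).set c.toNat (((t.countP (fun x => x.toNat == c.toNat) : Nat) : Int) + 1)
      = cntOf (c :: t) := by
  apply List.ext_getElem
  · simp [cntOf]
  · intro i h1 h2
    simp only [cntOf, List.length_map, List.length_range] at h2
    rw [List.getElem_set]
    by_cases hi : c.toNat = i
    · rw [if_pos hi]
      simp only [cntOf, List.getElem_map, List.getElem_range]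
      rw [List.countP_cons, if_pos (by simp [hi]), ← hi]
      push_cast
      ring
    · rw [if_neg hi]
      simp only [cntOf, List.getElem_map, List.getElem_range]
      rw [List.countP_cons, if_neg (by simp; exact fun hh => hi (hh ▸ rfl))]
      push_cast
      ring

lemma sum_range_countP (j : Nat) : ∀ (s : List Char),
    ((List.range j).map (fun o => ((s.countP (fun c => c.toNat == o) : Nat) : Int))).sum
      = (s.countP (fun c => decide (c.toNat < j)) : Int) := by
  intro s
  induction s with
  | nil => simp
  | cons x s ih =>
    have hpt : ∀ o : Nat, (((x :: s).countP (fun c => c.toNat == o) : Nat) : Int)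
        = ((s.countP (fun c => c.toNat == o) : Nat) : Int)
          + (if (x.toNat == o) = true then 1 else 0) := by
      intro o
      rw [List.countP_cons]
      by_cases h : (x.toNat == o) = true
      · rw [h]; push_cast; ring
      · rw [if_neg h]
        simp only [h, Bool.false_eq_true, if_false]
        push_cast
        ring
    rw [List.map_congr_left (fun o _ => hpt o), PySem.List.sum_map_add_int, ih,
      PySem.List.sum_map_ite_one_zero (fun o => x.toNat == o) (List.range j)]
    have hcc : List.countP (fun o => x.toNat == o) (List.range j)
        = List.count x.toNat (List.range j) := by
      rw [List.count_eq_countP]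
      exact List.countP_congr (fun a _ => by rw [beq_iff_eq, beq_iff_eq]; omega)
    rw [hcc, List.count_range, List.countP_cons]
    by_cases hx : x.toNat < j
    · rw [if_pos hx, if_pos (by simpa using hx)]
      push_cast
      ring
    · rw [if_neg hx, if_neg (by simpa using hx)]
      push_cast
      ring

lemma B_loop (n : Nat) : ∀ (s : List Char), s.length ≤ n → (∀ c ∈ s, c.toNat < 256) →
    s.reverse.foldl (altStep (build_fact (n : Int))) (List.replicate 256 0, 1, 0, 0)
      = (cntOf s, denomOf s, Gsum s, (s.length : Int)) := by
  intro s
  induction s with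
  | nil =>
    intro _ _
    simp only [List.reverse_nil, List.foldl_nil, List.length_nil, Nat.cast_zero]
    rw [show cntOf [] = List.replicate 256 0 by
      have h1 : (List.range 256).map
            (fun o => ((([] : List Char).countP (fun c => c.toNat == o) : Nat) : Int))
          = (List.range 256).map (fun _ => (0 : Int)) :=
        List.map_congr_left (fun o _ => by norm_num)
      rw [cntOf, h1, List.map_const', List.length_range]]
    rfl
  | cons c t ih =>
    intro hlen hdom
    have hlt : t.length ≤ n := by
      simp only [List.length_cons] at hlen
      omega
    have hc256 : c.toNat < 256 := hdom c List.mem_cons_self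
    rw [List.reverse_cons, List.foldl_append,
      ih hlt (fun x hx => hdom x (List.mem_cons_of_mem c hx)),
      List.foldl_cons, List.foldl_nil, altStep]
    have hgetT : PySem.List.pyGetD (cntOf t) ((c.toNat : Nat) : Int) 0
        = ((t.countP (fun x => x.toNat == c.toNat) : Nat) : Int) := by
      rw [PySem.List.pyGetD_natCast, List.getD_eq_getElem?_getD, cntOf_getElem? t c.toNat hc256]
      rfl
    have hset : PySem.List.pySetD (cntOf t) ((c.toNat : Nat) : Int)
        (PySem.List.pyGetD (cntOf t) ((c.toNat : Nat) : Int) 0 + 1) = cntOf (c :: t) := by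
      rw [hgetT, PySem.List.pySetD_natCast]
      exact cntOf_set c t hc256
    rw [hset]
    have hgetCT : PySem.List.pyGetD (cntOf (c :: t)) ((c.toNat : Nat) : Int) 0
        = ((t.count c : Nat) : Int) + 1 := by
      rw [PySem.List.pyGetD_natCast, List.getD_eq_getElem?_getD, cntOf_getElem? _ c.toNat hc256]
      show (((c :: t).countP (fun x => x.toNat == c.toNat) : Nat) : Int) = _
      rw [List.countP_cons, if_pos (by simp), countP_toNat_eq_count]
      push_cast
      ring
    rw [hgetCT]
    have hdenom : denomOf t * (((t.count c : Nat) : Int) + 1) = denomOf (c :: t) := rfl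
    rw [hdenom]
    have hslice : PySem.List.slice (cntOf (c :: t)) none (some ((c.toNat : Nat) : Int))
        = ((List.range c.toNat).map
            (fun o => (((c :: t).countP (fun x => x.toNat == o) : Nat) : Int))) := by
      rw [PySem.List.slice_to _ (Int.natCast_nonneg c.toNat), cntOf, Int.toNat_natCast, ← List.map_take,
        List.take_range, Nat.min_eq_left (le_of_lt hc256)]
    have hsum : ((List.range c.toNat).map
          (fun o => (((c :: t).countP (fun x => x.toNat == o) : Nat) : Int))).foldl (· + ·) 0
        = (((c :: t).countP (fun x => decide (x < c)) : Nat) : Int) := by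
      rw [← List.sum_eq_foldl, sum_range_countP c.toNat (c :: t)]
      congr 1
    have hfact : PySem.List.pyGetD (build_fact (n : Int)) ((t.length : Nat) : Int) 0
        = (t.length.factorial : Int) := by
      rw [PySem.List.pyGetD_natCast, build_fact_eq, List.getD_eq_getElem?_getD]
      simp [Nat.lt_succ_of_le hlt]
    rw [hslice, hsum, hfact]
    refine Prod.ext rfl (Prod.ext rfl (Prod.ext ?_ ?_))
    · show Gsum t + _ = Gsum (c :: t)
      rw [Gsum, termOf]
      ring
    · show ((t.length : Nat) : Int) + 1 = (((c :: t).length : Nat) : Int)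
      push_cast [List.length_cons]
      ring

lemma B_val (word : String) (h : ∀ c ∈ word.toList, c.toNat < 256) :
    dictionary_rank_alt word = Gsum word.toList + 1 := by
  rw [dictionary_rank_alt]
  rw [show PySem.Str.len word = ((word.toList.length : Nat) : Int) by
    simp [String.length_toList]]
  rw [B_loop word.toList.length word.toList le_rfl h]

-- ===== VERDICT (by name: the statement is the Claim_ definition above) =====
theorem dictionary_rank_spec : Claim_equal_dictionary_rank := by
  intro word hdom
  unfold Spec_dictionary_rank
  rw [A_val, B_val]
  · ring
  · intro c hc
    have h1 : pvDomChar c = true := by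
      have h2 : word.toList.all pvDomChar = true := hdom
      exact List.all_eq_true.mp h2 c hc
    simp only [pvDomChar, Bool.or_eq_true, Bool.and_eq_true, decide_eq_true_eq, beq_iff_eq] at h1
    omega
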